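-- pv_equiv track=rewrite | github.com/cchelooo/EID-1-Funciones | src/function_analyzer/utils.py | pretty_power
-- ===== SOURCE A (Python) =====
-- def pretty_power(expr: str) -> str:
--     # Convierte potencias comunes a superíndices Unicode
--     replacements = {
--         "**1": "¹",
--         "**2": "²",
--         "**3": "³",
--         "**4": "⁴",
--         "**5": "⁵",
--         "**6": "⁶",
--         "**7": "⁷",
--         "**8": "⁸",
--         "**9": "⁹",
--         "**0": "⁰",
--     }
--     for k, v in replacements.items():
--         expr = expr.replace(k, v)
--     return expr
-- ===== SOURCE B (Python) =====
-- SUP = {"1": "\u00b9", "2": "\u00b2", "3": "\u00b3", "4": "\u2074",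
--        "5": "\u2075", "6": "\u2076", "7": "\u2077", "8": "\u2078",
--        "9": "\u2079", "0": "\u2070"}
--
--
-- def pretty_power(expr: str) -> str:
--     # Single left-to-right scan instead of ten full-string replace passes.
--     out = []
--     i = 0
--     n = len(expr)
--     while i < n:
--         if expr[i] == "*" and i + 2 < n and expr[i + 1] == "*" and expr[i + 2] in SUP:
--             out.append(SUP[expr[i + 2]])
--             i += 3
--         else:
--             out.append(expr[i])
--             i += 1
--     return "".join(out)
-- ===== Notes on version B (the rewrite author's own statement) =====
-- stated objective: alternative
-- what changed: Replaced ten sequential full-string str.replace passes (one per digit) with a single left-to-right index scan that emits the superscript whenever a double asterisk is immediately followed by an ASCII digit.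
import Mathlib
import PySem

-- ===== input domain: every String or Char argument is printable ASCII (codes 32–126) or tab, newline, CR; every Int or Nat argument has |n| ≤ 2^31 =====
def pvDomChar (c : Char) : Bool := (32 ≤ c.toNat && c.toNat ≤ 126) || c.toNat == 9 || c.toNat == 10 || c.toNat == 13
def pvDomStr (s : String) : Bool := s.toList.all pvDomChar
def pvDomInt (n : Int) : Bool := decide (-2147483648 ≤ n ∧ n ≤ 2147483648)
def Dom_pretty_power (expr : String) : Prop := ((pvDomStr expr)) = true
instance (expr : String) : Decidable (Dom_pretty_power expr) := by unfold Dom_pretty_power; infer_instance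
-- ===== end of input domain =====

-- B replaces A's ten sequential full-string replace passes by a single left-to-right scan over the characters (an alternative one-pass algorithm with the same result).


-- ===== PORT A =====
-- the replacements dict of A, in Python's insertion order
def ppPairs : List (String × String) :=
  [("**1", "¹"), ("**2", "²"), ("**3", "³"), ("**4", "⁴"), ("**5", "⁵"),
   ("**6", "⁶"), ("**7", "⁷"), ("**8", "⁸"), ("**9", "⁹"), ("**0", "⁰")]

def pretty_power (expr : String) : String :=
  ppPairs.foldl (fun e kv => PySem.Str.replace e kv.1 kv.2) expr

-- ===== PORT B =====
-- the SUP dict lookup of Source B: `expr[i+2] in SUP` / `SUP[expr[i+2]]`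
def ppSup? (c : Char) : Option Char :=
  if c = '1' then some '¹' else if c = '2' then some '²' else if c = '3' then some '³'
  else if c = '4' then some '⁴' else if c = '5' then some '⁵' else if c = '6' then some '⁶'
  else if c = '7' then some '⁷' else if c = '8' then some '⁸' else if c = '9' then some '⁹'
  else if c = '0' then some '⁰' else none

def ppScan (l : List Char) : List Char :=
  match l with
  | c :: c₂ :: d :: rest =>
    if c = '*' ∧ c₂ = '*' then
      match ppSup? d with
      | some s => s :: ppScan rest
      | none => c :: ppScan (c₂ :: d :: rest)
    else c :: ppScan (c₂ :: d :: rest)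
  | c :: rest => c :: ppScan rest
  | [] => []
termination_by l.length

def pretty_power_alt (expr : String) : String :=
  String.ofList (ppScan expr.toList)

-- ===== PRECONDITION & SPEC =====
def Spec_pretty_power (expr : String) (out : String) : Prop := out = pretty_power_alt expr
instance (expr : String) (out : String) : Decidable (Spec_pretty_power expr out) := by unfold Spec_pretty_power; infer_instance

-- ===== CLAIM (what is proved, stated in full; the proofs are below) =====
def Claim_equal_pretty_power : Prop := ∀ (expr : String), Dom_pretty_power expr → Spec_pretty_power expr (pretty_power expr)

-- ===== LEMMAS AND PROOFS =====

-- fuel-free characterisation of one replace pass with pattern ['*','*',d] and replacement [s]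
def repl3 (d s : Char) (l : List Char) : List Char :=
  match l with
  | c :: c₂ :: e :: t =>
    if c = '*' ∧ c₂ = '*' ∧ e = d then s :: repl3 d s t
    else c :: repl3 d s (c₂ :: e :: t)
  | c :: t => c :: repl3 d s t
  | [] => []
termination_by l.length

def patAny : List Char → Bool
  | a :: b :: e :: _ => a = '*' && b = '*' && PySem.Chars.isdigit e
  | _ => false

theorem repl3_nil (d s : Char) : repl3 d s [] = [] := by simp [repl3]

theorem repl3_one (d s c : Char) : repl3 d s [c] = [c] := by
  rw [repl3] <;> simp [repl3]

theorem repl3_two (d s c x : Char) : repl3 d s [c, x] = [c, x] := by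
  rw [repl3] <;> simp [repl3_one]

theorem repl3_match (d s : Char) (m : List Char) :
    repl3 d s ('*' :: '*' :: d :: m) = s :: repl3 d s m := by
  rw [repl3]; simp

theorem repl3_cons_of_not_pat (d s c : Char) (t : List Char)
    (hd : PySem.Chars.isdigit d = true) (h : patAny (c :: t) = false) :
    repl3 d s (c :: t) = c :: repl3 d s t := by
  match t with
  | [] => rw [repl3_one, repl3_nil]
  | [x] => rw [repl3_two, repl3_one]
  | x :: y :: t' =>
    rw [repl3]
    simp only [patAny, Bool.and_eq_false_iff, decide_eq_false_iff_not] at h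
    split_ifs with hc
    · obtain ⟨h1, h2, h3⟩ := hc
      subst h1; subst h2; subst h3
      simp [hd] at h
    · rfl

theorem repl3_cons_head (d s c : Char) (t : List Char) :
    (∃ r, repl3 d s (c :: t) = c :: r) ∨ (∃ r, repl3 d s (c :: t) = s :: r) := by
  match t with
  | [] => exact Or.inl ⟨_, repl3_one d s c⟩
  | [x] => exact Or.inl ⟨_, repl3_two d s c x⟩
  | x :: y :: t' =>
    rw [repl3]
    split_ifs with hc
    · exact Or.inr ⟨_, rfl⟩
    · exact Or.inl ⟨_, rfl⟩

theorem repl3_push_other (d s e : Char) (m : List Char)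
    (he : e ≠ '*') (hne : e ≠ d) :
    repl3 d s ('*' :: '*' :: e :: m) = '*' :: '*' :: e :: repl3 d s m := by
  rw [repl3]
  simp only [hne, and_false, if_false]
  match m with
  | [] => rw [repl3_two, repl3_nil]
  | [x] =>
    rw [repl3]
    simp only [he, false_and, and_false, if_false]
    rw [repl3_two, repl3_one]
  | x :: y :: m' =>
    rw [repl3]
    simp only [he, false_and, and_false, if_false]
    rw [repl3]
    simp [he]

-- cannot create a new pattern at a copied head
theorem patAny_cons_ne (c : Char) (hc : c ≠ '*') (t : List Char) : patAny (c :: t) = false := by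
  match t with
  | [] => rfl
  | [x] => rfl
  | x :: y :: t' => simp [patAny, hc]

theorem patAny_snd_ne (c a : Char) (ha : a ≠ '*') (t : List Char) : patAny (c :: a :: t) = false := by
  match t with
  | [] => rfl
  | x :: t' => simp [patAny, ha]

theorem patAny_cons_repl3 (d s c : Char) (t : List Char)
    (hs1 : s ≠ '*') (hs2 : PySem.Chars.isdigit s = false)
    (h : patAny (c :: t) = false) : patAny (c :: repl3 d s t) = false := by
  by_cases hc : c = '*'
  case neg => exact patAny_cons_ne c hc _
  subst hc
  match t with
  | [] => rw [repl3_nil]; rfl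
  | a :: u =>
    by_cases ha : a = '*'
    case neg =>
      rcases repl3_cons_head d s a u with ⟨r, hr⟩ | ⟨r, hr⟩
      · rw [hr]; exact patAny_snd_ne _ _ ha _
      · rw [hr]; exact patAny_snd_ne _ _ hs1 _
    subst ha
    match u with
    | [] => rw [repl3_one]; rfl
    | b :: w =>
      have hb : PySem.Chars.isdigit b = false := by
        simp [patAny] at h; exact h
      -- compute repl3 d s ('*' :: b :: w)
      match w with
      | [] =>
        rw [repl3_two]; simp [patAny, hb]
      | x :: w' =>
        rw [repl3]
        split_ifs with hcnd
        · exact patAny_snd_ne _ _ hs1 _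
        · rcases repl3_cons_head d s b (x :: w') with ⟨r, hr⟩ | ⟨r, hr⟩
          · rw [hr]; simp [patAny, hb]
          · rw [hr]; simp [patAny, hs2]

theorem go_zero (old new l acc : List Char) :
    PySem.Chars.replace.go old new 0 l acc = acc.reverse ++ l := by
  rw [PySem.Chars.replace.go]

theorem go_succ_nil (old new acc : List Char) (n : Nat) :
    PySem.Chars.replace.go old new (n + 1) [] acc = acc.reverse := by
  rw [PySem.Chars.replace.go]
  simp

theorem go_succ_cons (old new acc : List Char) (n : Nat) (c : Char) (t : List Char) :
    PySem.Chars.replace.go old new (n + 1) (c :: t) acc =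
      if old.isPrefixOf (c :: t) then
        PySem.Chars.replace.go old new n (List.drop old.length (c :: t)) (new.reverse ++ acc)
      else PySem.Chars.replace.go old new n t (c :: acc) := by
  rw [PySem.Chars.replace.go]

theorem replace_go_eq_repl3 (d s : Char) :
    ∀ fuel : Nat, ∀ l acc : List Char, l.length ≤ fuel →
      PySem.Chars.replace.go ['*', '*', d] [s] fuel l acc = acc.reverse ++ repl3 d s l := by
  intro fuel
  induction fuel with
  | zero =>
    intro l acc h
    have hl : l = [] := by cases l <;> simp_all
    subst hl
    rw [go_zero, repl3_nil]
  | succ n ih =>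
    intro l acc h
    match l with
    | [] => rw [go_succ_nil, repl3_nil]; simp
    | c :: c₂ :: e :: t =>
      rw [go_succ_cons]
      by_cases hp : c = '*' ∧ c₂ = '*' ∧ e = d
      · obtain ⟨h1, h2, h3⟩ := hp
        subst h1; subst h2; subst h3
        have hpre : List.isPrefixOf ['*', '*', e] ('*' :: '*' :: e :: t) = true := by
          simp [List.isPrefixOf]
        rw [if_pos hpre, repl3_match]
        have hdrop : List.drop (List.length ['*', '*', e]) ('*' :: '*' :: e :: t) = t := by simp
        rw [hdrop, ih t _ (by simp at h ⊢; omega)]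
        simp
      · have hpre : List.isPrefixOf ['*', '*', d] (c :: c₂ :: e :: t) = false := by
          simp [List.isPrefixOf]
          intro h1 h2 h3
          exact hp ⟨h1.symm, h2.symm, h3.symm⟩
        rw [if_neg (by simp [hpre]), ih _ _ (by simp at h ⊢; omega)]
        rw [repl3, if_neg hp]
        simp
    | [c] =>
      rw [go_succ_cons]
      rw [if_neg (by simp [List.isPrefixOf])]
      rw [ih _ _ (by simp), repl3_nil, repl3_one]
      simp
    | [c, c₂] =>
      rw [go_succ_cons]
      rw [if_neg (by simp [List.isPrefixOf])]
      rw [ih _ _ (by simp at h ⊢; omega), repl3_one, repl3_two]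
      simp

theorem replace_eq_repl3 (d s : Char) (l : List Char) :
    PySem.Chars.replace l ['*', '*', d] [s] = repl3 d s l := by
  rw [PySem.Chars.replace]
  simp only [List.isEmpty]
  exact replace_go_eq_repl3 d s l.length l [] le_rfl

def GoodPairs (q : List (Char × Char)) : Prop :=
  ∀ p ∈ q, PySem.Chars.isdigit p.1 = true ∧ p.2 ≠ '*' ∧ PySem.Chars.isdigit p.2 = false

def chainOf (q : List (Char × Char)) (l : List Char) : List Char :=
  q.foldl (fun l p => repl3 p.1 p.2 l) l

theorem chainOf_nil : ∀ q : List (Char × Char), chainOf q [] = [] := by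
  intro q
  induction q with
  | nil => rfl
  | cons p q ih => simp only [chainOf, List.foldl_cons, repl3_nil] at ih ⊢; exact ih

theorem chainOf_cons_of_not_pat : ∀ q : List (Char × Char), GoodPairs q →
    ∀ (c : Char) (t : List Char), patAny (c :: t) = false →
      chainOf q (c :: t) = c :: chainOf q t := by
  intro q
  induction q with
  | nil => intro _ c t _; rfl
  | cons p q ih =>
    intro hq c t h
    have hp := hq p (by simp)
    have hq' : GoodPairs q := fun p hp => hq p (by simp [hp])
    simp only [chainOf, List.foldl_cons]
    rw [repl3_cons_of_not_pat _ _ _ _ hp.1 h]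
    exact ih hq' c _ (patAny_cons_repl3 _ _ _ _ hp.2.1 hp.2.2 h)

theorem chainOf_push_other (e : Char) (he : PySem.Chars.isdigit e = true) :
    ∀ q : List (Char × Char), GoodPairs q → (∀ p ∈ q, p.1 ≠ e) →
    ∀ m : List Char,
      chainOf q ('*' :: '*' :: e :: m) = '*' :: '*' :: e :: chainOf q m := by
  intro q
  induction q with
  | nil => intro _ _ m; rfl
  | cons p q ih =>
    intro hq hne m
    have hp := hq p (by simp)
    have hstar : e ≠ '*' := by
      intro h; rw [h] at he; exact absurd he (by decide)
    simp only [chainOf, List.foldl_cons]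
    rw [repl3_push_other _ _ _ _ hstar (Ne.symm (hne p (by simp)))]
    exact ih (fun p hp => hq p (by simp [hp])) (fun p hp => hne p (by simp [hp])) (repl3 p.1 p.2 m)

theorem chainOf_push_sup (s : Char) (hs : s ≠ '*') :
    ∀ q : List (Char × Char), GoodPairs q →
    ∀ m : List Char, chainOf q (s :: m) = s :: chainOf q m := by
  intro q
  induction q with
  | nil => intro _ m; rfl
  | cons p q ih =>
    intro hq m
    have hp := hq p (by simp)
    simp only [chainOf, List.foldl_cons]
    rw [repl3_cons_of_not_pat _ _ _ _ hp.1 (patAny_cons_ne s hs m)]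
    exact ih (fun p hp => hq p (by simp [hp])) _

theorem chainOf_append (q₁ q₂ : List (Char × Char)) (l : List Char) :
    chainOf (q₁ ++ q₂) l = chainOf q₂ (chainOf q₁ l) := by
  simp [chainOf, List.foldl_append]

theorem chainOf_match (q₁ q₂ : List (Char × Char)) (d s : Char)
    (hq : GoodPairs (q₁ ++ (d, s) :: q₂)) (hne : ∀ p ∈ q₁, p.1 ≠ d) (m : List Char) :
    chainOf (q₁ ++ (d, s) :: q₂) ('*' :: '*' :: d :: m) =
      s :: chainOf (q₁ ++ (d, s) :: q₂) m := by
  have hq₁ : GoodPairs q₁ := fun p hp => hq p (by simp [hp])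
  have hq₂ : GoodPairs q₂ := fun p hp => hq p (by simp [hp])
  have hds := hq (d, s) (by simp)
  rw [chainOf_append, chainOf_append]
  rw [chainOf_push_other d hds.1 q₁ hq₁ hne m]
  show chainOf q₂ (repl3 d s ('*' :: '*' :: d :: chainOf q₁ m)) =
    s :: chainOf q₂ (repl3 d s (chainOf q₁ m))
  rw [repl3_match]
  exact chainOf_push_sup s hds.2.1 q₂ hq₂ _

def ppCPairs : List (Char × Char) :=
  [('1', '¹'), ('2', '²'), ('3', '³'), ('4', '⁴'), ('5', '⁵'),
   ('6', '⁶'), ('7', '⁷'), ('8', '⁸'), ('9', '⁹'), ('0', '⁰')]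

theorem char_eq_of_toNat (e c : Char) (h : e.toNat = c.toNat) : e = c := by
  apply Char.ext; exact UInt32.toNat_inj.mp h

theorem digit_cases (e : Char) (h : PySem.Chars.isdigit e = true) :
    e='0'∨e='1'∨e='2'∨e='3'∨e='4'∨e='5'∨e='6'∨e='7'∨e='8'∨e='9' := by
  simp [PySem.Chars.isdigit] at h
  obtain ⟨h1, h2⟩ := h
  have h1' : 48 ≤ e.toNat := h1
  have h2' : e.toNat ≤ 57 := h2
  have h3 : e.toNat = 48 ∨ e.toNat = 49 ∨ e.toNat = 50 ∨ e.toNat = 51 ∨ e.toNat = 52 ∨ e.toNat = 53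
      ∨ e.toNat = 54 ∨ e.toNat = 55 ∨ e.toNat = 56 ∨ e.toNat = 57 := by omega
  rcases h3 with h|h|h|h|h|h|h|h|h|h
  · exact Or.inl (char_eq_of_toNat _ _ h)
  · exact Or.inr <| Or.inl (char_eq_of_toNat _ _ h)
  · exact Or.inr <| Or.inr <| Or.inl (char_eq_of_toNat _ _ h)
  · exact Or.inr <| Or.inr <| Or.inr <| Or.inl (char_eq_of_toNat _ _ h)
  · exact Or.inr <| Or.inr <| Or.inr <| Or.inr <| Or.inl (char_eq_of_toNat _ _ h)
  · exact Or.inr <| Or.inr <| Or.inr <| Or.inr <| Or.inr <| Or.inl (char_eq_of_toNat _ _ h)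
  · exact Or.inr <| Or.inr <| Or.inr <| Or.inr <| Or.inr <| Or.inr <| Or.inl (char_eq_of_toNat _ _ h)
  · exact Or.inr <| Or.inr <| Or.inr <| Or.inr <| Or.inr <| Or.inr <| Or.inr <| Or.inl (char_eq_of_toNat _ _ h)
  · exact Or.inr <| Or.inr <| Or.inr <| Or.inr <| Or.inr <| Or.inr <| Or.inr <| Or.inr <| Or.inl (char_eq_of_toNat _ _ h)
  · exact Or.inr <| Or.inr <| Or.inr <| Or.inr <| Or.inr <| Or.inr <| Or.inr <| Or.inr <| Or.inr (char_eq_of_toNat _ _ h)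

theorem ppSup?_isSome_of_digit (e : Char) (he : PySem.Chars.isdigit e = true) :
    (ppSup? e).isSome = true := by
  rcases digit_cases e he with rfl|rfl|rfl|rfl|rfl|rfl|rfl|rfl|rfl|rfl <;> decide

theorem isdigit_of_ppSup?_some (e s : Char) (h : ppSup? e = some s) :
    PySem.Chars.isdigit e = true := by
  unfold ppSup? at h
  split_ifs at h <;> subst_vars <;> decide

theorem goodPairs_ppCPairs : GoodPairs ppCPairs := by
  intro p hp
  fin_cases hp <;> refine ⟨by decide, by decide, by decide⟩

theorem chainOf_pp_match (e s : Char) (h : ppSup? e = some s) (m : List Char) :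
    chainOf ppCPairs ('*' :: '*' :: e :: m) = s :: chainOf ppCPairs m := by
  unfold ppSup? at h
  split_ifs at h with h1 h2 h3 h4 h5 h6 h7 h8 h9 h10
  · subst h1
    obtain rfl : '¹' = s := by injection h
    exact chainOf_match [] _ '1' '¹' goodPairs_ppCPairs (by decide) m
  · subst h2
    obtain rfl : '²' = s := by injection h
    exact chainOf_match [('1', '¹')] _ '2' '²' goodPairs_ppCPairs (by decide) m
  · subst h3
    obtain rfl : '³' = s := by injection h
    exact chainOf_match [('1', '¹'), ('2', '²')] _ '3' '³' goodPairs_ppCPairs (by decide) m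
  · subst h4
    obtain rfl : '⁴' = s := by injection h
    exact chainOf_match [('1', '¹'), ('2', '²'), ('3', '³')] _ '4' '⁴' goodPairs_ppCPairs (by decide) m
  · subst h5
    obtain rfl : '⁵' = s := by injection h
    exact chainOf_match [('1', '¹'), ('2', '²'), ('3', '³'), ('4', '⁴')] _ '5' '⁵' goodPairs_ppCPairs (by decide) m
  · subst h6
    obtain rfl : '⁶' = s := by injection h
    exact chainOf_match [('1', '¹'), ('2', '²'), ('3', '³'), ('4', '⁴'), ('5', '⁵')] _ '6' '⁶' goodPairs_ppCPairs (by decide) m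
  · subst h7
    obtain rfl : '⁷' = s := by injection h
    exact chainOf_match [('1', '¹'), ('2', '²'), ('3', '³'), ('4', '⁴'), ('5', '⁵'), ('6', '⁶')] _ '7' '⁷' goodPairs_ppCPairs (by decide) m
  · subst h8
    obtain rfl : '⁸' = s := by injection h
    exact chainOf_match [('1', '¹'), ('2', '²'), ('3', '³'), ('4', '⁴'), ('5', '⁵'), ('6', '⁶'), ('7', '⁷')] _ '8' '⁸' goodPairs_ppCPairs (by decide) m
  · subst h9
    obtain rfl : '⁹' = s := by injection h
    exact chainOf_match [('1', '¹'), ('2', '²'), ('3', '³'), ('4', '⁴'), ('5', '⁵'), ('6', '⁶'), ('7', '⁷'), ('8', '⁸')] _ '9' '⁹' goodPairs_ppCPairs (by decide) m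
  · subst h10
    obtain rfl : '⁰' = s := by injection h
    exact chainOf_match [('1', '¹'), ('2', '²'), ('3', '³'), ('4', '⁴'), ('5', '⁵'), ('6', '⁶'), ('7', '⁷'), ('8', '⁸'), ('9', '⁹')] _ '0' '⁰' goodPairs_ppCPairs (by decide) m

theorem ppScan_nil : ppScan [] = [] := by simp [ppScan]

theorem ppScan_one (c : Char) : ppScan [c] = [c] := by
  rw [ppScan] <;> simp [ppScan]

theorem ppScan_two (c x : Char) : ppScan [c, x] = [c, x] := by
  rw [ppScan] <;> simp [ppScan_one]

theorem ppSup?_eq_none_of_not_digit (e : Char) (hd : PySem.Chars.isdigit e = false) :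
    ppSup? e = none := by
  cases hsup : ppSup? e with
  | none => rfl
  | some s => rw [isdigit_of_ppSup?_some e s hsup] at hd; exact absurd hd (by simp)

theorem ppScan_nopat (c : Char) (t : List Char) (h : patAny (c :: t) = false) :
    ppScan (c :: t) = c :: ppScan t := by
  match t with
  | [] => rw [ppScan_one, ppScan_nil]
  | [x] => rw [ppScan_two, ppScan_one]
  | x :: y :: t' =>
    rw [ppScan]
    split_ifs with hc
    · obtain ⟨rfl, rfl⟩ := hc
      simp only [patAny] at h
      simp only [decide_true, Bool.true_and] at h
      rw [ppSup?_eq_none_of_not_digit y h]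
    · rfl

theorem ppScan_match (e s : Char) (h : ppSup? e = some s) (m : List Char) :
    ppScan ('*' :: '*' :: e :: m) = s :: ppScan m := by
  rw [ppScan]; simp [h]

theorem chainOf_eq_ppScan : ∀ l : List Char, chainOf ppCPairs l = ppScan l := by
  suffices H : ∀ n (l : List Char), l.length ≤ n → chainOf ppCPairs l = ppScan l by
    intro l; exact H l.length l le_rfl
  intro n
  induction n with
  | zero =>
    intro l h
    have hl : l = [] := by cases l <;> simp_all
    subst hl
    rw [chainOf_nil, ppScan_nil]
  | succ n ih =>
    intro l h
    match l with
    | [] => rw [chainOf_nil, ppScan_nil]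
    | [c] =>
      rw [chainOf_cons_of_not_pat _ goodPairs_ppCPairs _ _ rfl, ppScan_one, chainOf_nil]
    | [c, c₂] =>
      rw [chainOf_cons_of_not_pat _ goodPairs_ppCPairs _ _ rfl, ppScan_two,
        chainOf_cons_of_not_pat _ goodPairs_ppCPairs _ _ rfl, chainOf_nil]
    | c :: c₂ :: e :: t =>
      by_cases hstar : c = '*' ∧ c₂ = '*'
      · obtain ⟨rfl, rfl⟩ := hstar
        cases hsup : ppSup? e with
        | some s =>
          rw [chainOf_pp_match e s hsup t, ppScan_match e s hsup t,
            ih t (by simp at h ⊢; omega)]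
        | none =>
          have hd : PySem.Chars.isdigit e = false := by
            cases hd' : PySem.Chars.isdigit e
            · rfl
            · have := ppSup?_isSome_of_digit e hd'
              rw [hsup] at this
              exact absurd this (by simp)
          have hpa : patAny ('*' :: '*' :: e :: t) = false := by simp [patAny, hd]
          rw [chainOf_cons_of_not_pat _ goodPairs_ppCPairs _ _ hpa, ppScan_nopat _ _ hpa,
            ih _ (by simp at h ⊢; omega)]
      · have hpa : patAny (c :: c₂ :: e :: t) = false := by
          by_cases h1 : c = '*'
          · subst h1
            have h2 : ¬ c₂ = '*' := fun h2 => hstar ⟨rfl, h2⟩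
            simp [patAny, h2]
          · simp [patAny, h1]
        rw [chainOf_cons_of_not_pat _ goodPairs_ppCPairs _ _ hpa, ppScan_nopat _ _ hpa,
          ih _ (by simp at h ⊢; omega)]
theorem str_replace_key (s old new : String) (d sup : Char)
    (ho : old.toList = ['*', '*', d]) (hn : new.toList = [sup]) :
    PySem.Str.replace s old new = String.ofList (repl3 d sup s.toList) := by
  rw [PySem.Str.replace, ho, hn, replace_eq_repl3]

theorem pretty_power_toList (expr : String) :
    pretty_power expr = String.ofList (chainOf ppCPairs expr.toList) := by
  simp only [pretty_power, ppPairs, List.foldl_cons, List.foldl_nil]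
  rw [str_replace_key _ _ _ '0' '⁰' rfl rfl]
  rw [str_replace_key _ _ _ '9' '⁹' rfl rfl]
  rw [str_replace_key _ _ _ '8' '⁸' rfl rfl]
  rw [str_replace_key _ _ _ '7' '⁷' rfl rfl]
  rw [str_replace_key _ _ _ '6' '⁶' rfl rfl]
  rw [str_replace_key _ _ _ '5' '⁵' rfl rfl]
  rw [str_replace_key _ _ _ '4' '⁴' rfl rfl]
  rw [str_replace_key _ _ _ '3' '³' rfl rfl]
  rw [str_replace_key _ _ _ '2' '²' rfl rfl]
  rw [str_replace_key _ _ _ '1' '¹' rfl rfl]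
  simp only [String.toList_ofList]
  simp [chainOf, ppCPairs]

-- ===== VERDICT (by name: the statement is the Claim_ definition above) =====
theorem pretty_power_spec : Claim_equal_pretty_power := by
  intro expr _
  unfold Spec_pretty_power
  rw [pretty_power_toList, pretty_power_alt, chainOf_eq_ppScan]
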